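-- pv_equiv track=rewrite | github.com/SquirtlesAlgorithmStudy/squirtlesAlgorithmStudy-S345 | 의진/카카오/두 큐 합 같게 만들기.py | solution
-- ===== SOURCE A (Python) =====
-- from collections import deque
--
-- def solution(queue1, queue2):
--     queue1 = deque(queue1)
--     queue2 = deque(queue2)
--     count = 0
--     difference = sum(queue1) - sum(queue2)
--     if difference == 0:
--         return 0
--     while True:
--         if difference == 0:
--             return count
--
--         if count > 2 * (len(queue1) + len(queue2)):
--             count = -1
--             break
--         count += 1
--
--         if difference < 0:
--             difference += (2 * queue2[0])
--             move(1, queue1, queue2)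
--
--         else:
--             difference -= (2 * queue1[0])
--             move(2, queue1, queue2)
--     return count
--
-- def move(state, queue1, queue2):
--
--     if state == 1:
--         queue1.append(queue2.popleft())
--     elif state == 2:
--         queue2.append(queue1.popleft())
-- ===== SOURCE B (Python) =====
-- def solution(queue1, queue2):
--     n1 = len(queue1)
--     n = n1 + len(queue2)
--     if n == 0:
--         return 0
--     combined = (queue1 + queue2) * 4
--     P = [0]
--     s = 0
--     for x in combined:
--         s += x
--         P.append(s)
--     total = P[n]
--     i, j = 0, n1
--     for count in range(2 * n + 2):
--         w = P[j] - P[i]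
--         if 2 * w == total:
--             return count
--         if 2 * w > total:
--             i += 1
--         else:
--             j += 1
--     return -1
-- ===== Notes on version B (the rewrite author's own statement) =====
-- stated objective: alternative
-- what changed: Replaces the mutable deque simulation with a prefix-sum array built once over the repeated combined list and a two-pointer cyclic-window walk; the move count is the number of pointer advances, no queue is ever mutated.
-- outside the precondition, e.g. on solution([-1], [-1]): A returns 0, B returns 0
import Mathlib
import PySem

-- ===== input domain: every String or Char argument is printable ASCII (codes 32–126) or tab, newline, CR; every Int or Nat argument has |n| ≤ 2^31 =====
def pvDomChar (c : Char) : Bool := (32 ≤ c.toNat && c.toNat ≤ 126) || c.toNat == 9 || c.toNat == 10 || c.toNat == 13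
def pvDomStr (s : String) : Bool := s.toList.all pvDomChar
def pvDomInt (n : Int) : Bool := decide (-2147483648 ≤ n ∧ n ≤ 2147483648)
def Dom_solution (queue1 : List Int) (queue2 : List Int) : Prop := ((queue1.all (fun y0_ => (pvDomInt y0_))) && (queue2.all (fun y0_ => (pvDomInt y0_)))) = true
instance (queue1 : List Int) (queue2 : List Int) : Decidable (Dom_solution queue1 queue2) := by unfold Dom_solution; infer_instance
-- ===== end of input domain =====

-- B replaces A's deque simulation by a prefix-sum array over the repeated combined
-- list and a two-pointer cyclic-window walk (alternative decomposition, same cost);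
-- return-value equivalence is claimed on Pre_ (nonnegative total sum).

-- ===== PORT A =====
-- A's while-True loop; the count bound guarantees at most 2n+2 iterations, fuel is
-- the totality guard and is never exhausted on the call below.  The [] branches are
-- where Python's popleft raises IndexError (excluded by Pre_solution).
def loopA : Nat → Int → Int → List Int → List Int → Int
  | 0, _, _, _, _ => -1
  | fuel+1, count, diff, q1, q2 =>
    if diff = 0 then count
    else if 2 * ((q1.length : Int) + (q2.length : Int)) < count then -1
    else if diff < 0 then
      match q2 with
      | [] => -1
      | x :: t => loopA fuel (count + 1) (diff + 2 * x) (q1 ++ [x]) t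
    else
      match q1 with
      | [] => -1
      | x :: t => loopA fuel (count + 1) (diff - 2 * x) t (q2 ++ [x])

def solution (queue1 : List Int) (queue2 : List Int) : Int :=
  let diff := queue1.sum - queue2.sum
  if diff = 0 then 0
  else loopA (2 * (queue1.length + queue2.length) + 2) 0 diff queue1 queue2

-- ===== PORT B =====
-- running-sum prefix list: Source B's `P = [0]; s = 0; for x in combined: s += x; P.append(s)`
def prefixAcc (s : Int) : List Int → List Int
  | [] => []
  | x :: t => (s + x) :: prefixAcc (s + x) t

-- Source B's `for count in range(2*n+2)` loop over pointers i, j.  Index reads are shown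
-- in range on Pre_ inputs; `.getD 0` is the total form of the pyGet?.
def loopB (P : List Int) (total : Int) : Nat → Int → Int → Int → Int
  | 0, _, _, _ => -1
  | fuel+1, count, i, j =>
    let w := (PySem.List.pyGet? P j).getD 0 - (PySem.List.pyGet? P i).getD 0
    if 2 * w = total then count
    else if total < 2 * w then loopB P total fuel (count + 1) (i + 1) j
    else loopB P total fuel (count + 1) i (j + 1)

def solution_alt (queue1 : List Int) (queue2 : List Int) : Int :=
  let n1 := queue1.length
  let n := n1 + queue2.length
  if n = 0 then 0
  else
    let combined := (queue1 ++ queue2) ++ (queue1 ++ queue2) ++ (queue1 ++ queue2) ++ (queue1 ++ queue2)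
    let P := 0 :: prefixAcc 0 combined
    let total := (PySem.List.pyGet? P (n : Int)).getD 0
    loopB P total (2 * n + 2) 0 0 (n1 : Int)

-- ===== PRECONDITION & SPEC =====
-- Pre_ restricts to nonnegative total sum, a closed-form region on which A provably
-- never raises; A raises IndexError (popleft of an emptied deque) on most
-- negative-total inputs, and on the negative-total inputs where A does return, B
-- returns the same value anyway — the exclusion only keeps the precondition closed-form.
def Pre_solution (queue1 : List Int) (queue2 : List Int) : Prop :=
  0 ≤ queue1.sum + queue2.sum
instance (queue1 : List Int) (queue2 : List Int) : Decidable (Pre_solution queue1 queue2) := by unfold Pre_solution; infer_instance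

def pvWitness_solution : List Int × List Int := ([3, 2, 7, 2], [4, 6, 5, 1])

def Spec_solution (queue1 : List Int) (queue2 : List Int) (out : Int) : Prop := out = solution_alt queue1 queue2
instance (queue1 : List Int) (queue2 : List Int) (out : Int) : Decidable (Spec_solution queue1 queue2 out) := by unfold Spec_solution; infer_instance

-- ===== CLAIM (what is proved, stated in full; the proofs are below) =====
def Claim_equal_solution : Prop := ∀ (queue1 : List Int) (queue2 : List Int), Dom_solution queue1 queue2 → Pre_solution queue1 queue2 → Spec_solution queue1 queue2 (solution queue1 queue2)

-- ===== LEMMAS AND PROOFS =====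

-- prefix sums of a list, and contiguous segments, used to relate the two loops
def pvS (l : List Int) (k : ℕ) : Int := (l.take k).sum
def pvSeg (l : List Int) (a b : ℕ) : List Int := (l.drop a).take (b - a)

lemma pvPrefixGet (l : List Int) (s : Int) (k : ℕ) (hk : k ≤ l.length) :
    (s :: prefixAcc s l)[k]? = some (s + pvS l k) := by
  induction l generalizing s k with
  | nil =>
    have : k = 0 := by simpa using hk
    subst this
    simp [prefixAcc, pvS]
  | cons x t ih =>
    cases k with
    | zero => simp [prefixAcc, pvS]
    | succ k =>
      have hk' : k ≤ t.length := by simpa using hk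
      have := ih (s + x) k hk'
      simp only [prefixAcc, List.getElem?_cons_succ] at *
      rw [this]
      simp [pvS, List.take_succ_cons, add_assoc]

lemma pvS_succ (l : List Int) (k : ℕ) (hk : k < l.length) :
    pvS l (k + 1) = pvS l k + l.getD k 0 := by
  induction l generalizing k with
  | nil => simp at hk
  | cons x t ih =>
    cases k with
    | zero => simp [pvS]
    | succ k =>
      have hk' : k < t.length := by simpa using hk
      have := ih k hk'
      simp [pvS, List.take_succ_cons] at this ⊢
      omega

lemma pvSeg_len (l : List Int) (a b : ℕ) (_hab : a ≤ b) (hb : b ≤ l.length) :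
    (pvSeg l a b).length = b - a := by
  simp [pvSeg]
  omega

lemma pvSeg_cons (l : List Int) (a b : ℕ) (hab : a < b) (hb : b ≤ l.length) :
    pvSeg l a b = l.getD a 0 :: pvSeg l (a + 1) b := by
  have ha : a < l.length := lt_of_lt_of_le hab hb
  unfold pvSeg
  rw [List.drop_eq_getElem_cons ha]
  have : b - a = (b - (a + 1)) + 1 := by omega
  rw [this, List.take_succ_cons]
  simp [List.getD, ha]

lemma pvSeg_snoc (l : List Int) (a b : ℕ) (_hab : a ≤ b) (hb : b < l.length) :
    pvSeg l a (b + 1) = pvSeg l a b ++ [l.getD b 0] := by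
  unfold pvSeg
  have : b + 1 - a = (b - a) + 1 := by omega
  rw [this, List.take_add_one]
  have : (l.drop a)[b - a]? = some (l.getD b 0) := by
    rw [List.getElem?_drop]
    have : a + (b - a) = b := by omega
    rw [this]
    simp [List.getD, List.getElem?_eq_getElem hb]
  rw [this]
  simp

lemma pvPeriod (c : List Int) (k : ℕ) (hk : k < 3 * c.length) :
    (c ++ c ++ c ++ c).getD (k + c.length) 0 = (c ++ c ++ c ++ c).getD k 0 := by
  have h3 : (c ++ c ++ c).length = 3 * c.length := by simp; ring
  have hre : c ++ c ++ c ++ c = c ++ (c ++ c ++ c) := by simp [List.append_assoc]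
  rw [List.getD_eq_getElem?_getD, List.getD_eq_getElem?_getD]
  rw [hre, List.getElem?_append_right (by omega : c.length ≤ k + c.length)]
  have hk' : k + c.length - c.length = k := by omega
  rw [hk', ← hre, List.getElem?_append_left (by omega : k < (c ++ c ++ c).length)]

lemma pvPeriodSum (c : List Int) (i : ℕ) (hi : i ≤ 3 * c.length) :
    pvS (c ++ c ++ c ++ c) (i + c.length) = pvS (c ++ c ++ c ++ c) i + c.sum := by
  have hlen : (c ++ c ++ c ++ c).length = 4 * c.length := by simp; ring
  induction i with
  | zero =>
    have hre : c ++ c ++ c ++ c = c ++ (c ++ c ++ c) := by simp [List.append_assoc]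
    simp only [Nat.zero_add, pvS, hre, List.take_left]
    simp
  | succ i ih =>
    have hi' : i ≤ 3 * c.length := by omega
    have h1 : i + c.length < (c ++ c ++ c ++ c).length := by omega
    have h2 : i < (c ++ c ++ c ++ c).length := by omega
    have : i + 1 + c.length = (i + c.length) + 1 := by omega
    rw [this, pvS_succ _ _ h1, pvS_succ _ _ h2, ih hi', pvPeriod c i (by omega)]
    ring

lemma pv_loop_eq (c : List Int) (n : ℕ) (hn : n = c.length) (hpos : 0 < n)
    (htot : 0 ≤ c.sum) :
    ∀ (fuel count i j : ℕ), fuel + count = 2 * n + 2 → i ≤ j → j ≤ i + n →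
      i ≤ count → j ≤ n + count →
      loopA fuel (count : Int)
        (2 * (pvS (c ++ c ++ c ++ c) j - pvS (c ++ c ++ c ++ c) i) - c.sum)
        (pvSeg (c ++ c ++ c ++ c) i j) (pvSeg (c ++ c ++ c ++ c) j (i + n))
      = loopB (0 :: prefixAcc 0 (c ++ c ++ c ++ c)) c.sum fuel (count : Int) (i : Int) (j : Int) := by
  intro fuel
  induction fuel with
  | zero => intro count i j _ _ _ _ _; simp [loopA, loopB]
  | succ f ih =>
    intro count i j hfc hij hji hic hjc
    have hcc : (c ++ c ++ c ++ c).length = 4 * n := by simp [← hn]; ring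
    have hcnt : count ≤ 2 * n + 1 := by omega
    have hi2 : i ≤ 2 * n + 1 := by omega
    have hj3 : j ≤ 3 * n + 1 := by omega
    have hjcc : j ≤ (c ++ c ++ c ++ c).length := by omega
    have hicc : i ≤ (c ++ c ++ c ++ c).length := by omega
    -- evaluate the two prefix-array reads in loopB
    have hPj : (PySem.List.pyGet? (0 :: prefixAcc 0 (c ++ c ++ c ++ c)) ((j : ℕ) : Int)).getD 0
        = pvS (c ++ c ++ c ++ c) j := by
      rw [PySem.List.pyGet?_natCast, pvPrefixGet _ _ _ (by omega)]; simp
    have hPi : (PySem.List.pyGet? (0 :: prefixAcc 0 (c ++ c ++ c ++ c)) ((i : ℕ) : Int)).getD 0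
        = pvS (c ++ c ++ c ++ c) i := by
      rw [PySem.List.pyGet?_natCast, pvPrefixGet _ _ _ (by omega)]; simp
    simp only [loopB, hPj, hPi, loopA]
    set w := pvS (c ++ c ++ c ++ c) j - pvS (c ++ c ++ c ++ c) i with hw
    by_cases h0 : 2 * w = c.sum
    · rw [if_pos (show 2 * w - c.sum = 0 by omega), if_pos h0]
    · rw [if_neg (show ¬ (2 * w - c.sum = 0) by omega), if_neg h0]
      have hlq1 : (pvSeg (c ++ c ++ c ++ c) i j).length = j - i := pvSeg_len _ _ _ hij hjcc
      have hlq2 : (pvSeg (c ++ c ++ c ++ c) j (i + n)).length = i + n - j :=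
        pvSeg_len _ _ _ hji (by omega)
      have hlensum : 2 * (((pvSeg (c ++ c ++ c ++ c) i j).length : Int)
          + ((pvSeg (c ++ c ++ c ++ c) j (i + n)).length : Int)) = 2 * (n : Int) := by
        rw [hlq1, hlq2]; omega
      rw [hlensum]
      by_cases hb : 2 * n < count
      · -- count bound reached: both sides return -1
        have hf0 : f = 0 := by omega
        subst hf0
        rw [if_pos (show 2 * (n : Int) < (count : Int) by exact_mod_cast hb)]
        split_ifs <;> simp [loopB]
      · rw [if_neg (show ¬ (2 * (n : Int) < (count : Int)) by exact_mod_cast (by omega : ¬ (2 * n < count)))]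
        have hi3 : i ≤ 2 * n := by omega
        by_cases hneg : 2 * w < c.sum
        · -- window grows: A takes queue2's head, B advances j
          have hjlt : j < i + n := by
            rcases Nat.lt_or_ge j (i + n) with h | h
            · exact h
            · exfalso
              have hj' : j = i + n := by omega
              have hper := pvPeriodSum c i (by omega)
              rw [← hn] at hper
              have : w = c.sum := by rw [hw, hj']; omega
              omega
          have hjlen : j < (c ++ c ++ c ++ c).length := by omega
          have hq2 : pvSeg (c ++ c ++ c ++ c) j (i + n)
              = (c ++ c ++ c ++ c).getD j 0 :: pvSeg (c ++ c ++ c ++ c) (j + 1) (i + n) :=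
            pvSeg_cons _ _ _ hjlt (by omega)
          have hsucc := pvS_succ (c ++ c ++ c ++ c) j hjlen
          have hq1' : pvSeg (c ++ c ++ c ++ c) i j ++ [(c ++ c ++ c ++ c).getD j 0]
              = pvSeg (c ++ c ++ c ++ c) i (j + 1) := (pvSeg_snoc _ _ _ hij hjlen).symm
          have hdiff' : 2 * w - c.sum + 2 * (c ++ c ++ c ++ c).getD j 0
              = 2 * (pvS (c ++ c ++ c ++ c) (j + 1) - pvS (c ++ c ++ c ++ c) i) - c.sum := by
            omega
          rw [if_pos (show 2 * w - c.sum < 0 by omega), hq2,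
            if_neg (show ¬ (c.sum < 2 * w) by omega)]
          simp only
          rw [hq1', hdiff']
          have hcast1 : ((count : Int) + 1) = ((count + 1 : ℕ) : Int) := by push_cast; ring
          have hcast2 : ((j : Int) + 1) = ((j + 1 : ℕ) : Int) := by push_cast; ring
          rw [hcast1, hcast2]
          exact ih (count + 1) i (j + 1) (by omega) (by omega) (by omega) (by omega) (by omega)
        · -- window shrinks: A pops queue1's head, B advances i
          have hgt : c.sum < 2 * w := by omega
          have hilt : i < j := by
            rcases Nat.lt_or_ge i j with h | h
            · exact h
            · exfalso
              have hij' : i = j := by omega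
              have : w = 0 := by rw [hw, hij']; omega
              omega
          have hilen : i < (c ++ c ++ c ++ c).length := by omega
          have hq1 : pvSeg (c ++ c ++ c ++ c) i j
              = (c ++ c ++ c ++ c).getD i 0 :: pvSeg (c ++ c ++ c ++ c) (i + 1) j :=
            pvSeg_cons _ _ _ hilt hjcc
          have hper := pvPeriod c i (by omega)
          rw [← hn] at hper
          have hq2' : pvSeg (c ++ c ++ c ++ c) j (i + n) ++ [(c ++ c ++ c ++ c).getD i 0]
              = pvSeg (c ++ c ++ c ++ c) j (i + 1 + n) := by
            rw [← hper, ← pvSeg_snoc _ _ _ hji (by omega)]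
            congr 1
            omega
          have hsucc := pvS_succ (c ++ c ++ c ++ c) i hilen
          have hdiff' : 2 * w - c.sum - 2 * (c ++ c ++ c ++ c).getD i 0
              = 2 * (pvS (c ++ c ++ c ++ c) j - pvS (c ++ c ++ c ++ c) (i + 1)) - c.sum := by
            omega
          rw [if_neg (show ¬ (2 * w - c.sum < 0) by omega), hq1, if_pos hgt]
          simp only
          rw [hq2', hdiff']
          have hcast1 : ((count : Int) + 1) = ((count + 1 : ℕ) : Int) := by push_cast; ring
          have hcast2 : ((i : Int) + 1) = ((i + 1 : ℕ) : Int) := by push_cast; ring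
          rw [hcast1, hcast2]
          exact ih (count + 1) (i + 1) j (by omega) (by omega) (by omega) (by omega) (by omega)

-- ===== VERDICT (by name: the statement is the Claim_ definition above) =====
theorem solution_spec : Claim_equal_solution := by
  unfold Claim_equal_solution Spec_solution Pre_solution
  intro q1 q2 _ hpre
  simp only [solution, solution_alt]
  by_cases hn0 : q1.length + q2.length = 0
  · have h1 : q1 = [] := List.eq_nil_of_length_eq_zero (by omega)
    have h2 : q2 = [] := List.eq_nil_of_length_eq_zero (by omega)
    subst h1; subst h2
    simp
  · rw [if_neg hn0]
    set c := q1 ++ q2 with hc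
    set n := q1.length + q2.length with hnq
    have hn : n = c.length := by simp [hc, hnq]
    have hpos : 0 < n := by omega
    have htot : 0 ≤ c.sum := by
      rw [hc, List.sum_append]; exact hpre
    have hcc : (c ++ c ++ c ++ c).length = 4 * n := by simp [← hn]; ring
    have hsplit : c ++ c ++ c ++ c = q1 ++ (q2 ++ (c ++ (c ++ c))) := by
      rw [hc]; simp [List.append_assoc]
    -- the total read from the prefix array is the combined sum
    have htotal : (PySem.List.pyGet? (0 :: prefixAcc 0 (c ++ c ++ c ++ c)) ((n : ℕ) : Int)).getD 0
        = c.sum := by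
      rw [PySem.List.pyGet?_natCast, pvPrefixGet _ _ _ (by omega)]
      simp only [Option.getD_some, zero_add]
      unfold pvS
      rw [hn, show c ++ c ++ c ++ c = c ++ (c ++ c ++ c) from by simp [List.append_assoc],
        List.take_left]
    have hS0 : pvS (c ++ c ++ c ++ c) 0 = 0 := by simp [pvS]
    have hSn1 : pvS (c ++ c ++ c ++ c) q1.length = q1.sum := by
      unfold pvS
      rw [hsplit, List.take_left]
    have hseg1 : pvSeg (c ++ c ++ c ++ c) 0 q1.length = q1 := by
      unfold pvSeg
      rw [List.drop_zero, Nat.sub_zero, hsplit, List.take_left]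
    have hseg2 : pvSeg (c ++ c ++ c ++ c) q1.length (0 + n) = q2 := by
      unfold pvSeg
      rw [Nat.zero_add, hsplit, List.drop_left,
        show n - q1.length = q2.length from by omega, List.take_left]
    have hmain := pv_loop_eq c n hn hpos htot (2 * n + 2) 0 0 q1.length rfl
      (by omega) (by omega) (by omega) (by omega)
    rw [hS0, hseg1, hseg2, hSn1] at hmain
    have hdiffc : 2 * (q1.sum - 0) - c.sum = q1.sum - q2.sum := by
      rw [hc, List.sum_append]; ring
    rw [hdiffc] at hmain
    rw [htotal]
    by_cases hd : q1.sum - q2.sum = 0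
    · rw [if_pos hd]
      -- B's first loop iteration returns 0 as well
      rw [show 2 * n + 2 = (2 * n + 1) + 1 from rfl]
      simp only [loopB]
      have hPj : (PySem.List.pyGet? (0 :: prefixAcc 0 (c ++ c ++ c ++ c)) ((q1.length : ℕ) : Int)).getD 0
          = q1.sum := by
        rw [PySem.List.pyGet?_natCast, pvPrefixGet _ _ _ (by omega)]
        simp only [Option.getD_some, zero_add]
        exact hSn1
      have hP0 : (PySem.List.pyGet? (0 :: prefixAcc 0 (c ++ c ++ c ++ c)) (0 : Int)).getD 0
          = 0 := by
        rw [show (0 : Int) = ((0 : ℕ) : Int) from rfl, PySem.List.pyGet?_natCast,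
          pvPrefixGet _ _ _ (by omega)]
        simp [pvS]
      rw [hPj, hP0]
      rw [if_pos (show 2 * (q1.sum - 0) = c.sum from by rw [hc, List.sum_append]; omega)]
    · rw [if_neg hd]
      exact hmain
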